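-- pv_equiv track=rewrite | github.com/bluetifulc/baekjoon | Programmers/algorithm/169199.py | solution
-- ===== SOURCE A (Python) =====
-- from collections import deque
--
-- def solution(board):
--     R,C = len(board), len(board[0])
--     dm = [[0,1], [0,-1], [1,0], [-1, 0]]
--     q = deque()
--     srcr, srcc, destr, destc = 0, 0, 0, 0
--     for r in range(0,R):
--         for c in range(0,C):
--             if board[r][c] == 'R':
--                 srcr, srcc = r, c
--             if board[r][c] == 'G':
--                 destr, destc = r, c
--     visited = [[False] * C for _ in range(R)]
--     q.append((srcr, srcc))
--     visited[srcr][srcc] = True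
--
--     answer = 0
--     flag = False
--     y, x = 0, 0
--     while q:
--         qsize = len(q)
--         while qsize:
--             qsize -= 1
--             y, x = q.popleft()
--             if y == destr and x == destc:
--                 flag = True
--                 break
--             for d in range(4):
--                 dy, dx = y, x
--                 ny, nx = dm[d]
--                 while dy + ny >= 0 and dx + nx >= 0 and dy + ny < R and dx + nx < C and board[dy + ny][dx + nx] != 'D':
--                     dy, dx = dy + dm[d][0], dx + dm[d][1]
--                 if not visited[dy][dx]:
--                     q.append((dy,dx))
--                     visited[dy][dx] = True
--         if flag:
--             break
--         answer += 1
--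
--     if not flag:
--         answer = -1
--     return answer
-- ===== SOURCE B (Python) =====
-- def solution(board):
--     # Bellman-Ford style dynamic programming on the slide graph: build the
--     # predecessor lists of every cell once, then relax a distance table for
--     # R*C rounds; no queue, no visited structure.
--     R, C = len(board), len(board[0])
--     dirs = ((0, 1), (0, -1), (1, 0), (-1, 0))
--     src, dest = (0, 0), (0, 0)
--     for r in range(R):
--         for c in range(C):
--             if board[r][c] == 'R':
--                 src = (r, c)
--             if board[r][c] == 'G':
--                 dest = (r, c)
--     cells = [(r, c) for r in range(R) for c in range(C)]
--     preds = {p: [] for p in cells}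
--     for r, c in cells:
--         for dr, dc in dirs:
--             nr, nc = r, c
--             while 0 <= nr + dr < R and 0 <= nc + dc < C and board[nr + dr][nc + dc] != 'D':
--                 nr += dr
--                 nc += dc
--             preds[(nr, nc)].append((r, c))
--     INF = R * C + 1
--     dist = {p: INF for p in cells}
--     dist[src] = 0
--     for _ in range(R * C):
--         dist = {p: min([dist[p]] + [dist[q] + 1 for q in preds[p]]) for p in dist}
--     return dist[dest] if dist[dest] < INF else -1
-- ===== Notes on version B (the rewrite author's own statement) =====
-- stated objective: alternative
-- what changed: A's breadth-first search (deque, level-counting qsize loop, visited matrix) is replaced by Bellman-Ford dynamic programming: B builds the predecessor lists of the slide graph once, then relaxes a distance table for R*C rounds with no queue and no visited structure, finally reading off dist[dest].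
import Mathlib
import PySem

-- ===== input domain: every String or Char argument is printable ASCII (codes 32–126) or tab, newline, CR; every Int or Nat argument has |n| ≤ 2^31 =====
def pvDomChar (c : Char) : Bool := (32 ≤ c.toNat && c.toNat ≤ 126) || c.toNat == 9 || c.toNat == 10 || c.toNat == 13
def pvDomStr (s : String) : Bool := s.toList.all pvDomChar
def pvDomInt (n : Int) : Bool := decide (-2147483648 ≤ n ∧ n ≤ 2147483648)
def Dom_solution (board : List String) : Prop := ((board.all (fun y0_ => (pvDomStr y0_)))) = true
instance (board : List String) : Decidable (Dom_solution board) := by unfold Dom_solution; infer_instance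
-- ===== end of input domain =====

-- B replaces A's breadth-first search (deque + level-counting inner loop + visited matrix) by
-- Bellman-Ford dynamic programming: predecessor lists built once, then R*C relaxation rounds
-- of a distance table, finally reading dist[dest]; same value, no speed claim.

-- board[r][c] (both Pythons index the board this way; none = IndexError, excluded by Pre_)
def pvCell (board : List String) (r c : Int) : Option Char :=
  match PySem.List.pyGet? board r with
  | some s => PySem.Str.pyGet? s c
  | none => none

-- ===== PORT A =====
def pvDmA : List (Int × Int) := [(0, 1), (0, -1), (1, 0), (-1, 0)]

-- the guard of A's inner `while`: bounds first, then board[dy+ny][dx+nx] != 'D'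
-- (the board read returns `none` only off Pre_, where Python would raise; we stop the slide there)
def pvCondA (board : List String) (R C y x : Int) : Bool :=
  decide (0 ≤ y) && decide (0 ≤ x) && decide (y < R) && decide (x < C) &&
    (match pvCell board y x with
     | some ch => decide (ch ≠ 'D')
     | none => false)

-- A's slide-until-wall `while`; the fuel only makes the loop total (R+C steps always suffice:
-- the walker moves one cell per step in a single direction inside the R×C frame)
def pvSlideA (board : List String) (R C ny nx : Int) : Nat → Int → Int → Int × Int
  | 0, dy, dx => (dy, dx)
  | f + 1, dy, dx =>
    if pvCondA board R C (dy + ny) (dx + nx) then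
      pvSlideA board R C ny nx f (dy + ny) (dx + nx)
    else (dy, dx)

-- visited[y][x] (read out of range yields `true`, i.e. no push; unreachable in execution)
def pvGridGet (v : List (List Bool)) (y x : Int) : Bool :=
  match PySem.List.pyGet? v y with
  | some row => (PySem.List.pyGet? row x).getD true
  | none => true

-- visited[y][x] = True (indices are nonnegative at every call site, so toNat is exact)
def pvGridSet (v : List (List Bool)) (y x : Int) : List (List Bool) :=
  if 0 ≤ y ∧ 0 ≤ x then v.set y.toNat ((v.getD y.toNat []).set x.toNat true) else v

-- A's `for d in range(4)` body: slide, then push-if-unvisited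
def pvExpandA (board : List String) (R C : Int) (fs : Nat)
    (st : List (List Bool) × List (Int × Int)) (y x : Int) : List (List Bool) × List (Int × Int) :=
  pvDmA.foldl
    (fun st d =>
      let p := pvSlideA board R C d.1 d.2 fs y x
      if pvGridGet st.1 p.1 p.2 then st else (pvGridSet st.1 p.1 p.2, st.2 ++ [p]))
    st

-- A's inner `while qsize` sweep over one frontier (acc = nodes appended behind the frontier)
def pvInnerA (board : List String) (R C : Int) (fs : Nat) (destr destc : Int) :
    List (Int × Int) → List (List Bool) → List (Int × Int) →
    Bool × List (List Bool) × List (Int × Int)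
  | [], v, acc => (false, v, acc)
  | p :: rest, v, acc =>
    if p.1 = destr ∧ p.2 = destc then (true, v, acc)
    else
      let st := pvExpandA board R C fs (v, acc) p.1 p.2
      pvInnerA board R C fs destr destc rest st.1 st.2

-- A's outer `while q` loop, one level per iteration; the fuel only makes it total
-- (each level past the first marks a fresh cell visited, so R*C+2 levels always suffice)
def pvOuterA (board : List String) (R C : Int) (fs : Nat) (destr destc : Int) :
    Nat → List (List Bool) → List (Int × Int) → Int → Int
  | 0, _, _, _ => -1
  | f + 1, v, q, answer =>
    match q with
    | [] => -1
    | _ :: _ =>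
      let r := pvInnerA board R C fs destr destc q v []
      if r.1 then answer else pvOuterA board R C fs destr destc f r.2.1 r.2.2 (answer + 1)

-- src/dest scan, shared verbatim by both Pythons:
-- for r in range(0,R): for c in range(0,C): two ifs (last match wins)
def pvScanA (board : List String) (R C : Int) : (Int × Int) × (Int × Int) :=
  (PySem.List.pyRange 0 R 1).foldl
    (fun p r =>
      (PySem.List.pyRange 0 C 1).foldl
        (fun p c =>
          let p1 := if pvCell board r c = some 'R' then ((r, c), p.2) else p
          if pvCell board r c = some 'G' then (p1.1, (r, c)) else p1)
        p)
    ((0, 0), (0, 0))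

def solution (board : List String) : Int :=
  let R : Int := (board.length : Int)
  let C : Int := PySem.Str.len (board.headD "")   -- len(board[0]); board ≠ [] under Pre_
  let sd := pvScanA board R C
  let v0 := List.replicate R.toNat (List.replicate C.toNat false)
  let v1 := pvGridSet v0 sd.1.1 sd.1.2
  pvOuterA board R C (R.toNat + C.toNat) sd.2.1 sd.2.2 (R.toNat * C.toNat + 2) v1 [sd.1] 0

-- ===== PORT B =====
def pvDirsB : List (Int × Int) := [(0, 1), (0, -1), (1, 0), (-1, 0)]

-- B's slide-until-wall `while` (guard `0 <= nr+dr < R and 0 <= nc+dc < C and board[..] != 'D'`);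
-- fuel as in A's slide
def pvSlideB (board : List String) (R C dy dx : Int) : Nat → Int → Int → Int × Int
  | 0, ny, nx => (ny, nx)
  | f + 1, ny, nx =>
    if (decide (0 ≤ ny + dy) && decide (ny + dy < R)) &&
       ((decide (0 ≤ nx + dx) && decide (nx + dx < C)) &&
        (match pvCell board (ny + dy) (nx + dx) with
         | some ch => decide (ch ≠ 'D')
         | none => false)) then
      pvSlideB board R C dy dx f (ny + dy) (nx + dx)
    else (ny, nx)

-- cells = [(r, c) for r in range(R) for c in range(C)]
def pvCellsB (R C : Int) : List (Int × Int) :=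
  (PySem.List.pyRange 0 R 1).flatMap (fun r => (PySem.List.pyRange 0 C 1).map (fun c => (r, c)))

-- preds = {p: [] for p in cells}
def pvPreds0 (cells : List (Int × Int)) : PySem.Dict (Int × Int) (List (Int × Int)) :=
  cells.foldl (fun d p => d.insert p []) PySem.Dict.empty

-- the preds-building loop; preds[t].append(q): t is always a key (slide targets lie in cells),
-- so `modify` with default [] is exact (Python would raise KeyError only on a missing key)
def pvPreds (board : List String) (R C : Int) (fs : Nat) (cells : List (Int × Int)) :
    PySem.Dict (Int × Int) (List (Int × Int)) :=
  cells.foldl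
    (fun d q =>
      pvDirsB.foldl
        (fun d dd => d.modify (pvSlideB board R C dd.1 dd.2 fs q.1 q.2) [] (· ++ [q]))
        d)
    (pvPreds0 cells)

-- one relaxation round: {p: min([dist[p]] + [dist[q] + 1 for q in preds[p]]) for p in dist}
-- (dist[q] ported as getD _ 0: q is always a key, preds values lie in cells)
def pvRelax (preds : PySem.Dict (Int × Int) (List (Int × Int)))
    (dist : PySem.Dict (Int × Int) Int) : PySem.Dict (Int × Int) Int :=
  dist.items.foldl
    (fun nd pv =>
      nd.insert pv.1
        ((PySem.List.min? (pv.2 :: (preds.getD pv.1 []).map (fun q => dist.getD q 0 + 1))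
            (fun x => x)).getD 0))
    PySem.Dict.empty

def solution_alt (board : List String) : Int :=
  let R : Int := (board.length : Int)
  let C : Int := PySem.Str.len (board.headD "")   -- len(board[0]); board ≠ [] under Pre_
  let sd := pvScanA board R C                     -- the same src/dest scan as in Source A
  let cells := pvCellsB R C
  let preds := pvPreds board R C (R.toNat + C.toNat) cells
  let INF : Int := R * C + 1
  let dist0 := (cells.foldl (fun d p => d.insert p INF) PySem.Dict.empty).insert sd.1 0
  let dist := (PySem.List.pyRange 0 (R * C) 1).foldl (fun d _ => pvRelax preds d) dist0
  let dd := dist.getD sd.2 0                      -- dist[dest]; dest is always a key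
  if dd < INF then dd else -1

-- ===== PRECONDITION & SPEC =====
-- Pre_ excludes exactly the boards on which A raises IndexError: the empty board, an empty
-- first row (visited[0][0] fails), and boards whose later rows are shorter than board[0]
-- (the scan reads board[r][c] for every c < len(board[0])). A returns normally on all others.
def Pre_solution (board : List String) : Prop :=
  board ≠ [] ∧ 0 < (board.headD "").toList.length ∧
    ∀ s ∈ board, (board.headD "").toList.length ≤ s.toList.length
instance (board : List String) : Decidable (Pre_solution board) := by
  unfold Pre_solution; infer_instance
def pvWitness_solution : List String := ["R.G", "..D"]

def Spec_solution (board : List String) (out : Int) : Prop := out = solution_alt board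
instance (board : List String) (out : Int) : Decidable (Spec_solution board out) := by
  unfold Spec_solution; infer_instance

-- ===== CLAIM (what is proved, stated in full; the proofs are below) =====
def Claim_equal_solution : Prop :=
  ∀ (board : List String), Dom_solution board → Pre_solution board →
    Spec_solution board (solution board)

-- ===== LEMMAS AND PROOFS =====
-- (everything below this line is proof-side machinery only)

-- in-range cells
def pvInR (R C : Int) (p : Int × Int) : Prop := 0 ≤ p.1 ∧ p.1 < R ∧ 0 ≤ p.2 ∧ p.2 < C

-- shape of A's visited grid
def pvShape (R C : Int) (v : List (List Bool)) : Prop :=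
  ((v.length : Nat) : Int) = R ∧ ∀ row ∈ v, ((row.length : Nat) : Int) = C

-- A's grid and a set mark the same in-range cells
def pvRel (R C : Int) (v : List (List Bool)) (S : PySem.Set (Int × Int)) : Prop :=
  ∀ p : Int × Int, pvInR R C p → (pvGridGet v p.1 p.2 = true ↔ p ∈ S)

-- queue invariant: all cells in range and already marked visited
def pvQOK (R C : Int) (v : List (List Bool)) (q : List (Int × Int)) : Prop :=
  ∀ p ∈ q, pvInR R C p ∧ pvGridGet v p.1 p.2 = true

-- the level abstraction both ports are reduced to: sets of discovered cells plus frontier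
def pvEStep (S : PySem.Set (Int × Int) × List (Int × Int)) (t : Int × Int) :
    PySem.Set (Int × Int) × List (Int × Int) :=
  if PySem.Set.contains S.1 t then S else (PySem.Set.add S.1 t, S.2 ++ [t])

def pvNbrs (board : List String) (R C : Int) (fs : Nat) (p : Int × Int) : List (Int × Int) :=
  pvDmA.map (fun d => pvSlideA board R C d.1 d.2 fs p.1 p.2)

def pvStepS (board : List String) (R C : Int) (fs : Nat)
    (S : PySem.Set (Int × Int)) (F : List (Int × Int)) :
    PySem.Set (Int × Int) × List (Int × Int) :=
  F.foldl (fun st p => (pvNbrs board R C fs p).foldl pvEStep st) (S, [])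

def pvLevLoop (board : List String) (R C : Int) (fs : Nat) (destr destc : Int) :
    Nat → PySem.Set (Int × Int) × List (Int × Int) → Int → Int
  | 0, _, _ => -1
  | f + 1, SF, a =>
    match SF.2 with
    | [] => -1
    | _ :: _ =>
      if (destr, destc) ∈ SF.2 then a
      else pvLevLoop board R C fs destr destc f (pvStepS board R C fs SF.1 SF.2) (a + 1)

theorem pvSlideB_eq_A (board : List String) (R C ny nx : Int) :
    ∀ (f : Nat) (y x : Int), pvSlideB board R C ny nx f y x = pvSlideA board R C ny nx f y x := by
  have hc : ∀ y x : Int,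
      ((decide (0 ≤ y) && decide (y < R)) &&
       ((decide (0 ≤ x) && decide (x < C)) &&
        (match pvCell board y x with
         | some ch => decide (ch ≠ 'D')
         | none => false))) = pvCondA board R C y x := by
    intro y x
    unfold pvCondA
    cases decide (0 ≤ y) <;> cases decide (0 ≤ x) <;> cases decide (y < R) <;>
      cases decide (x < C) <;> simp
  intro f
  induction f with
  | zero => intro y x; rfl
  | succ f ih =>
    intro y x
    simp only [pvSlideA, pvSlideB, hc]
    split
    · exact ih _ _
    · rfl

theorem pvSlideA_inR (board : List String) (R C ny nx : Int) :
    ∀ (f : Nat) (y x : Int), pvInR R C (y, x) →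
      pvInR R C (pvSlideA board R C ny nx f y x) := by
  intro f
  induction f with
  | zero => intro y x h; exact h
  | succ f ih =>
    intro y x h
    simp only [pvSlideA]
    split
    · rename_i hcond
      refine ih _ _ ?_
      unfold pvCondA at hcond
      simp only [Bool.and_eq_true, decide_eq_true_eq] at hcond
      exact ⟨hcond.1.1.1.1, hcond.1.1.2, hcond.1.1.1.2, hcond.1.2⟩
    · exact h

theorem pvGridGet_getElem (v : List (List Bool)) (y x : Int) (hy0 : 0 ≤ y)
    (hy : y < (v.length : Int)) (hx0 : 0 ≤ x)
    (hx : x < (((v[y.toNat]'(by omega)).length : Nat) : Int)) :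
    pvGridGet v y x = (v[y.toNat]'(by omega))[x.toNat]'(by omega) := by
  unfold pvGridGet
  simp only [PySem.List.pyGet?_eq_some_getElem v hy0 hy,
    PySem.List.pyGet?_eq_some_getElem _ hx0 hx, Option.getD_some]

theorem pvGridSet_eq (v : List (List Bool)) (y x : Int) (hy0 : 0 ≤ y) (hx0 : 0 ≤ x) :
    pvGridSet v y x = v.set y.toNat ((v.getD y.toNat []).set x.toNat true) := by
  unfold pvGridSet
  rw [if_pos ⟨hy0, hx0⟩]

theorem pvShape_set (R C : Int) (v : List (List Bool)) (y x : Int)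
    (hsh : pvShape R C v) (hin : pvInR R C (y, x)) :
    pvShape R C (pvGridSet v y x) := by
  obtain ⟨hy0, hyR, hx0, hxC⟩ := hin
  obtain ⟨h1, h2⟩ := hsh
  rw [pvGridSet_eq v y x hy0 hx0]
  refine ⟨by simpa using h1, ?_⟩
  intro row hrow
  rcases List.mem_or_eq_of_mem_set hrow with h | h
  · exact h2 row h
  · subst h
    simp only [List.length_set]
    have hlt : y.toNat < v.length := by omega
    rw [List.getD_eq_getElem v [] hlt]
    exact h2 _ (List.getElem_mem hlt)

theorem pvGridGet_set_self (R C : Int) (v : List (List Bool)) (y x : Int)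
    (hsh : pvShape R C v) (hin : pvInR R C (y, x)) :
    pvGridGet (pvGridSet v y x) y x = true := by
  obtain ⟨hy0, hyR, hx0, hxC⟩ := hin
  obtain ⟨h1, h2⟩ := hsh
  have hlt : y.toNat < v.length := by omega
  have hrowlen : ((v[y.toNat]'hlt).length : Int) = C := h2 _ (List.getElem_mem hlt)
  rw [pvGridSet_eq v y x hy0 hx0, List.getD_eq_getElem v [] hlt]
  rw [pvGridGet_getElem _ y x hy0 (by simpa using (by omega : y < (v.length : Int)))
    hx0 (by simp [List.getElem_set_self, List.length_set]; omega)]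
  simp [List.getElem_set_self]

theorem pvGridGet_opt (v : List (List Bool)) (y x : Int) (hy0 : 0 ≤ y) (hx0 : 0 ≤ x) :
    pvGridGet v y x = (v[y.toNat]?.bind (fun row => row[x.toNat]?)).getD true := by
  unfold pvGridGet
  rw [PySem.List.pyGet?_of_nonneg v hy0]
  cases hrow : v[y.toNat]? with
  | none => rfl
  | some row =>
    simp only [Option.bind_some]
    rw [PySem.List.pyGet?_of_nonneg row hx0]

theorem pvGridGet_set_ne (R C : Int) (v : List (List Bool)) (p q : Int × Int)
    (hsh : pvShape R C v) (hp : pvInR R C p) (hq : pvInR R C q) (hne : q ≠ p) :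
    pvGridGet (pvGridSet v p.1 p.2) q.1 q.2 = pvGridGet v q.1 q.2 := by
  obtain ⟨hp1, hp2, hp3, hp4⟩ := hp
  obtain ⟨hq1, hq2, hq3, hq4⟩ := hq
  obtain ⟨h1, h2⟩ := hsh
  have hplt : p.1.toNat < v.length := by omega
  rw [pvGridSet_eq v p.1 p.2 hp1 hp3, List.getD_eq_getElem v [] hplt]
  rw [pvGridGet_opt _ q.1 q.2 hq1 hq3, pvGridGet_opt v q.1 q.2 hq1 hq3]
  by_cases hy : p.1.toNat = q.1.toNat
  · have hx : p.2.toNat ≠ q.2.toNat := by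
      intro hx
      exact hne (Prod.ext (by omega) (by omega)).symm
    rw [← hy, List.getElem?_set_self hplt, List.getElem?_eq_getElem hplt]
    simp only [Option.bind_some]
    rw [List.getElem?_set_ne hx]
  · rw [List.getElem?_set_ne hy]

theorem pvGridGet_mono (R C : Int) (v : List (List Bool)) (p q : Int × Int)
    (hsh : pvShape R C v) (hp : pvInR R C p) (hq : pvInR R C q)
    (h : pvGridGet v q.1 q.2 = true) :
    pvGridGet (pvGridSet v p.1 p.2) q.1 q.2 = true := by
  by_cases hqp : q = p
  · subst hqp; exact pvGridGet_set_self R C v q.1 q.2 hsh hp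
  · rw [pvGridGet_set_ne R C v p q hsh hp hq hqp]; exact h

theorem pvRel_add (R C : Int) (v : List (List Bool)) (S : PySem.Set (Int × Int))
    (p : Int × Int) (hrel : pvRel R C v S) (hsh : pvShape R C v) (hp : pvInR R C p) :
    pvRel R C (pvGridSet v p.1 p.2) (PySem.Set.add S p) := by
  intro q hq
  rw [PySem.Set.mem_add]
  by_cases hqp : q = p
  · subst hqp
    simp [pvGridGet_set_self R C v q.1 q.2 hsh hp]
  · rw [pvGridGet_set_ne R C v p q hsh hp hq hqp, hrel q hq]
    simp [hqp]

theorem pvFold_sim (board : List String) (R C : Int) (fs : Nat) (y x : Int)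
    (hin : pvInR R C (y, x)) :
    ∀ (ds : List (Int × Int)) (v : List (List Bool)) (S : PySem.Set (Int × Int))
      (acc : List (Int × Int)) (accS : List (Int × Int)),
      pvRel R C v S → pvShape R C v →
      ∃ v' S' L,
        ds.foldl
          (fun st d =>
            let p := pvSlideA board R C d.1 d.2 fs y x
            if pvGridGet st.1 p.1 p.2 then st else (pvGridSet st.1 p.1 p.2, st.2 ++ [p]))
          (v, acc) = (v', acc ++ L) ∧
        (ds.map (fun d => pvSlideA board R C d.1 d.2 fs y x)).foldl pvEStep (S, accS)
          = (S', accS ++ L) ∧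
        pvRel R C v' S' ∧ pvShape R C v' ∧
        (∀ q : Int × Int, pvInR R C q → pvGridGet v q.1 q.2 = true →
          pvGridGet v' q.1 q.2 = true) ∧
        (∀ p ∈ L, pvInR R C p ∧ pvGridGet v' p.1 p.2 = true) := by
  intro ds
  induction ds with
  | nil =>
    intro v S acc accS hrel hsh
    exact ⟨v, S, [], by simp, by simp, hrel, hsh, fun q _ h => h, by simp⟩
  | cons dd ds ih =>
    intro v S acc accS hrel hsh
    simp only [List.foldl_cons, List.map_cons]
    set p := pvSlideA board R C dd.1 dd.2 fs y x with hp
    have hpin : pvInR R C p := pvSlideA_inR board R C dd.1 dd.2 fs y x hin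
    by_cases hvis : pvGridGet v p.1 p.2 = true
    · have hmem : p ∈ S := (hrel p hpin).mp hvis
      have hcont : PySem.Set.contains S p = true := (PySem.Set.contains_iff S p).mpr hmem
      rw [if_pos hvis]
      have hes : pvEStep (S, accS) p = (S, accS) := by
        unfold pvEStep
        rw [if_pos hcont]
      rw [hes]
      exact ih v S acc accS hrel hsh
    · have hmem : p ∉ S := fun hm => hvis ((hrel p hpin).mpr hm)
      have hcont : ¬ PySem.Set.contains S p = true := fun hc =>
        hmem ((PySem.Set.contains_iff S p).mp hc)
      rw [if_neg hvis]
      have hes : pvEStep (S, accS) p = (PySem.Set.add S p, accS ++ [p]) := by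
        unfold pvEStep
        rw [if_neg hcont]
      rw [hes]
      have hrel2 := pvRel_add R C v S p hrel hsh hpin
      have hsh2 := pvShape_set R C v p.1 p.2 hsh hpin
      obtain ⟨v', S', L, hA, hB, hrel', hsh', hmono, hL⟩ :=
        ih (pvGridSet v p.1 p.2) (PySem.Set.add S p) (acc ++ [p]) (accS ++ [p]) hrel2 hsh2
      refine ⟨v', S', p :: L, ?_, ?_, hrel', hsh', ?_, ?_⟩
      · rw [hA]; simp
      · rw [hB]; simp
      · intro q hq h
        exact hmono q hq (pvGridGet_mono R C v p q hsh hpin hq h)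
      · intro r hr
        rcases List.mem_cons.mp hr with h | h
        · subst h
          refine ⟨hpin, ?_⟩
          exact hmono p hpin (pvGridGet_set_self R C v p.1 p.2 hsh hpin)
        · exact hL r h

-- A's inner `while qsize` sweep against the abstract frontier step
theorem pvInner_sim_found (board : List String) (R C : Int) (fs : Nat) (destr destc : Int) :
    ∀ (f : List (Int × Int)) (v : List (List Bool)) (acc : List (Int × Int))
      (S : PySem.Set (Int × Int)),
      pvRel R C v S → pvShape R C v → pvQOK R C v f → (destr, destc) ∈ f →
      (pvInnerA board R C fs destr destc f v acc).1 = true := by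
  intro f
  induction f with
  | nil => intro v acc S _ _ _ hd; simp at hd
  | cons p rest ih =>
    intro v acc S hrel hsh hqf hd
    by_cases hph : p.1 = destr ∧ p.2 = destc
    · simp only [pvInnerA]; rw [if_pos hph]
    · have hdrest : (destr, destc) ∈ rest := by
        rcases List.mem_cons.mp hd with h | h
        · exact absurd ⟨congrArg Prod.fst h.symm, congrArg Prod.snd h.symm⟩ hph
        · exact h
      simp only [pvInnerA]
      rw [if_neg hph]
      have hpin : pvInR R C (p.1, p.2) := by
        have := (hqf p List.mem_cons_self).1
        simpa using this
      obtain ⟨v2, S2, L, hA, hB, hrel2, hsh2, hmono2, hL⟩ :=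
        pvFold_sim board R C fs p.1 p.2 hpin pvDmA v S acc [] hrel hsh
      show (pvInnerA board R C fs destr destc rest
        (pvExpandA board R C fs (v, acc) p.1 p.2).1
        (pvExpandA board R C fs (v, acc) p.1 p.2).2).1 = true
      have hExp : pvExpandA board R C fs (v, acc) p.1 p.2 = (v2, acc ++ L) := hA
      rw [hExp]
      have hrest2 : pvQOK R C v2 rest := by
        intro r hr
        have := hqf r (List.mem_cons_of_mem p hr)
        exact ⟨this.1, hmono2 r this.1 this.2⟩
      exact ih v2 (acc ++ L) S2 hrel2 hsh2 hrest2 hdrest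

theorem pvInner_sim_not (board : List String) (R C : Int) (fs : Nat) (destr destc : Int) :
    ∀ (f : List (Int × Int)) (v : List (List Bool)) (acc : List (Int × Int))
      (S : PySem.Set (Int × Int)) (accS : List (Int × Int)),
      pvRel R C v S → pvShape R C v → pvQOK R C v f → pvQOK R C v acc →
      (destr, destc) ∉ f →
      (pvInnerA board R C fs destr destc f v acc).1 = false ∧
      ∃ S' M,
        (pvInnerA board R C fs destr destc f v acc).2.2 = acc ++ M ∧
        f.foldl (fun st p => (pvNbrs board R C fs p).foldl pvEStep st) (S, accS)
          = (S', accS ++ M) ∧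
        pvRel R C (pvInnerA board R C fs destr destc f v acc).2.1 S' ∧
        pvShape R C (pvInnerA board R C fs destr destc f v acc).2.1 ∧
        pvQOK R C (pvInnerA board R C fs destr destc f v acc).2.1 (acc ++ M) := by
  intro f
  induction f with
  | nil =>
    intro v acc S accS hrel hsh hqf hqacc _
    exact ⟨rfl, S, [], by simp [pvInnerA], by simp, hrel, hsh, by simpa using hqacc⟩
  | cons p rest ih =>
    intro v acc S accS hrel hsh hqf hqacc hd
    have hph : ¬ (p.1 = destr ∧ p.2 = destc) := by
      intro h
      exact hd (List.mem_cons.mpr (Or.inl (Prod.ext h.1.symm h.2.symm)))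
    have hdrest : (destr, destc) ∉ rest := fun h => hd (List.mem_cons_of_mem p h)
    simp only [pvInnerA]
    rw [if_neg hph]
    have hpin : pvInR R C (p.1, p.2) := by
      have := (hqf p List.mem_cons_self).1
      simpa using this
    obtain ⟨v2, S2, L, hA, hB, hrel2, hsh2, hmono2, hL⟩ :=
      pvFold_sim board R C fs p.1 p.2 hpin pvDmA v S acc accS hrel hsh
    have hExp : pvExpandA board R C fs (v, acc) p.1 p.2 = (v2, acc ++ L) := hA
    rw [hExp]
    have hrest2 : pvQOK R C v2 rest := by
      intro r hr
      have := hqf r (List.mem_cons_of_mem p hr)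
      exact ⟨this.1, hmono2 r this.1 this.2⟩
    have hacc2 : pvQOK R C v2 (acc ++ L) := by
      intro r hr
      rcases List.mem_append.mp hr with hh | hh
      · have := hqacc r hh
        exact ⟨this.1, hmono2 r this.1 this.2⟩
      · exact hL r hh
    obtain ⟨hflag, S', M', heq, hfold, hrel', hsh', hqok'⟩ :=
      ih v2 (acc ++ L) S2 (accS ++ L) hrel2 hsh2 hrest2 hacc2 hdrest
    refine ⟨hflag, S', L ++ M', by rw [heq, List.append_assoc], ?_, hrel', hsh', ?_⟩
    · simp only [List.foldl_cons]
      have hstep : (pvNbrs board R C fs p).foldl pvEStep (S, accS) = (S2, accS ++ L) := by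
        unfold pvNbrs
        rw [List.foldl_map]
        exact (by rw [List.foldl_map] at hB; exact hB)
      rw [hstep, hfold, List.append_assoc]
    · rw [← List.append_assoc]
      exact hqok'

-- A's outer loop against the level loop (equal fuel on both sides)
theorem pvOuter_sim (board : List String) (R C : Int) (fs : Nat) (destr destc : Int) :
    ∀ (fA : Nat) (v : List (List Bool)) (S : PySem.Set (Int × Int))
      (q : List (Int × Int)) (a : Int),
      pvRel R C v S → pvShape R C v → pvQOK R C v q →
      pvOuterA board R C fs destr destc fA v q a
        = pvLevLoop board R C fs destr destc fA (S, q) a := by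
  intro fA
  induction fA with
  | zero => intro v S q a _ _ _; rfl
  | succ fA ih =>
    intro v S q a hrel hsh hqok
    cases q with
    | nil => simp only [pvOuterA, pvLevLoop]
    | cons p rest =>
      simp only [pvOuterA, pvLevLoop]
      by_cases hd : (destr, destc) ∈ p :: rest
      · rw [if_pos hd]
        rw [pvInner_sim_found board R C fs destr destc (p :: rest) v [] S hrel hsh hqok hd]
        simp
      · rw [if_neg hd]
        obtain ⟨hflag, S', M, heq, hfold, hrel', hsh', hqok'⟩ :=
          pvInner_sim_not board R C fs destr destc (p :: rest) v [] S [] hrel hsh hqok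
            (by intro r hr; simp at hr) hd
        rw [hflag]
        simp only [Bool.false_eq_true, if_false]
        have hstepS : pvStepS board R C fs S (p :: rest) = (S', M) := by
          unfold pvStepS
          rw [hfold]
          simp
        rw [hstepS]
        have h22 : (pvInnerA board R C fs destr destc (p :: rest) v []).2.2 = M := by
          simpa using heq
        rw [h22]
        exact ih _ S' M (a + 1) hrel' hsh' (by simpa using hqok')

theorem pvScanA_inR (board : List String) (R C : Int) (hR : 0 < R) (hC : 0 < C) :
    pvInR R C (pvScanA board R C).1 ∧ pvInR R C (pvScanA board R C).2 := by
  unfold pvScanA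
  apply List.foldlRecOn _ _ (b := (((0 : Int), (0 : Int)), ((0 : Int), (0 : Int))))
    (motive := fun p => pvInR R C p.1 ∧ pvInR R C p.2)
  · exact ⟨⟨le_refl 0, hR, le_refl 0, hC⟩, ⟨le_refl 0, hR, le_refl 0, hC⟩⟩
  · intro p hp r hr
    apply List.foldlRecOn _ _ (b := p) (motive := fun p => pvInR R C p.1 ∧ pvInR R C p.2)
    · exact hp
    · intro p2 hp2 c hc
      obtain ⟨hr0, hrR⟩ := PySem.List.mem_pyRange_one.mp hr
      obtain ⟨hc0, hcC⟩ := PySem.List.mem_pyRange_one.mp hc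
      simp only []
      split <;> split <;>
        first
          | exact hp2
          | exact ⟨hp2.1, hr0, hrR, hc0, hcC⟩
          | exact ⟨⟨hr0, hrR, hc0, hcC⟩, hp2.2⟩
          | exact ⟨⟨hr0, hrR, hc0, hcC⟩, hr0, hrR, hc0, hcC⟩

theorem pvGridGet_replicate (R C : Int) (y x : Int) (hin : pvInR R C (y, x)) :
    pvGridGet (List.replicate R.toNat (List.replicate C.toNat false)) y x = false := by
  obtain ⟨hy0, hyR, hx0, hxC⟩ := hin
  rw [pvGridGet_getElem _ y x hy0 (by simp; omega) hx0
    (by simp [List.getElem_replicate]; omega)]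
  simp [List.getElem_replicate]

theorem pvShape_replicate (R C : Int) (hR : 0 ≤ R) (hC : 0 ≤ C) :
    pvShape R C (List.replicate R.toNat (List.replicate C.toNat false)) := by
  constructor
  · simp; omega
  · intro row hrow
    rw [List.eq_of_mem_replicate hrow]
    simp; omega

-- A's whole run reduced to the level loop
theorem pvA_to_lev (board : List String) (hpre : Pre_solution board) :
    solution board
      = pvLevLoop board (board.length : Int) (PySem.Str.len (board.headD ""))
          ((board.length : Int).toNat + (PySem.Str.len (board.headD "")).toNat)
          (pvScanA board (board.length : Int) (PySem.Str.len (board.headD ""))).2.1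
          (pvScanA board (board.length : Int) (PySem.Str.len (board.headD ""))).2.2
          ((board.length : Int).toNat * (PySem.Str.len (board.headD "")).toNat + 2)
          (PySem.Set.ofList
             [(pvScanA board (board.length : Int) (PySem.Str.len (board.headD ""))).1],
           [(pvScanA board (board.length : Int) (PySem.Str.len (board.headD ""))).1]) 0 := by
  obtain ⟨hne, hC0, hrows⟩ := hpre
  unfold solution
  set R : Int := (board.length : Int) with hRdef
  set C : Int := PySem.Str.len (board.headD "") with hCdef
  have hClen : C = ((board.headD "").toList.length : Int) := by
    rw [hCdef, PySem.Str.len_eq]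
  have hCpos : 0 < C := by omega
  have hRpos : 0 < R := by
    rw [hRdef]
    cases board with
    | nil => exact absurd rfl hne
    | cons h t => simp
  set sd := pvScanA board R C with hsd
  have hsrc : pvInR R C sd.1 := (pvScanA_inR board R C hRpos hCpos).1
  set v0 := List.replicate R.toNat (List.replicate C.toNat false) with hv0
  have hsh0 : pvShape R C v0 := pvShape_replicate R C (by omega) (by omega)
  have hget0 : ∀ q : Int × Int, pvInR R C q → pvGridGet v0 q.1 q.2 = false := by
    intro q hq
    exact pvGridGet_replicate R C q.1 q.2 hq
  set v1 := pvGridSet v0 sd.1.1 sd.1.2 with hv1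
  have hsrc' : pvInR R C (sd.1.1, sd.1.2) := by simpa using hsrc
  have hsh1 : pvShape R C v1 := pvShape_set R C v0 sd.1.1 sd.1.2 hsh0 hsrc'
  have hrel1 : pvRel R C v1 (PySem.Set.ofList [sd.1]) := by
    intro q hq
    have hofl : PySem.Set.ofList [sd.1] = [sd.1] := rfl
    rw [hofl, List.mem_singleton]
    by_cases hqs : q = sd.1
    · subst hqs
      constructor
      · intro _; rfl
      · intro _
        rw [hv1]
        exact pvGridGet_set_self R C v0 sd.1.1 sd.1.2 hsh0 hsrc'
    · have heq : pvGridGet v1 q.1 q.2 = pvGridGet v0 q.1 q.2 := by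
        rw [hv1]
        exact pvGridGet_set_ne R C v0 (sd.1.1, sd.1.2) q hsh0 hsrc' hq (by simpa using hqs)
      rw [heq, hget0 q hq]
      simp [hqs]
  have hqok1 : pvQOK R C v1 [sd.1] := by
    intro p hp
    rw [List.mem_singleton] at hp
    subst hp
    refine ⟨hsrc, ?_⟩
    rw [hv1]
    exact pvGridGet_set_self R C v0 sd.1.1 sd.1.2 hsh0 hsrc'
  exact pvOuter_sim board R C (R.toNat + C.toNat) sd.2.1 sd.2.2
    (R.toNat * C.toNat + 2) v1 (PySem.Set.ofList [sd.1]) [sd.1] 0 hrel1 hsh1 hqok1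

-- ordered "new elements" of a candidate list with respect to an already-seen list
def pvNew (S : List (Int × Int)) : List (Int × Int) → List (Int × Int)
  | [] => []
  | t :: L => if t ∈ S then pvNew S L else t :: pvNew (S ++ [t]) L

theorem pvGenFold : ∀ (L : List (Int × Int)) (S : PySem.Set (Int × Int))
    (acc : List (Int × Int)),
    L.foldl pvEStep (S, acc) = (S ++ pvNew S L, acc ++ pvNew S L) := by
  intro L
  induction L with
  | nil => intro S acc; simp [pvNew]
  | cons t L ih =>
    intro S acc
    simp only [List.foldl_cons, pvNew]
    by_cases hm : t ∈ S
    · have hcont : PySem.Set.contains S t = true := (PySem.Set.contains_iff S t).mpr hm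
      have hes : pvEStep (S, acc) t = (S, acc) := by unfold pvEStep; rw [if_pos hcont]
      rw [hes, if_pos hm, ih]
    · have hcont : ¬ PySem.Set.contains S t = true := fun hc =>
        hm ((PySem.Set.contains_iff S t).mp hc)
      have hadd : PySem.Set.add S t = S ++ [t] := by
        unfold PySem.Set.add
        rw [if_neg hcont]
      have hes : pvEStep (S, acc) t = (S ++ [t], acc ++ [t]) := by
        unfold pvEStep
        rw [if_neg hcont, hadd]
      rw [hes, if_neg hm, ih]
      simp

theorem mem_pvNew : ∀ (L S : List (Int × Int)) (p : Int × Int),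
    p ∈ pvNew S L → p ∉ S ∧ p ∈ L := by
  intro L
  induction L with
  | nil => intro S p h; simp [pvNew] at h
  | cons t L ih =>
    intro S p h
    simp only [pvNew] at h
    by_cases hm : t ∈ S
    · rw [if_pos hm] at h
      have := ih S p h
      exact ⟨this.1, List.mem_cons_of_mem t this.2⟩
    · rw [if_neg hm] at h
      rcases List.mem_cons.mp h with h | h
      · subst h; exact ⟨hm, List.mem_cons_self⟩
      · have := ih (S ++ [t]) p h
        refine ⟨fun hp => this.1 (List.mem_append_left _ hp), List.mem_cons_of_mem t this.2⟩

theorem pvNew_cover : ∀ (L S : List (Int × Int)) (p : Int × Int),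
    p ∈ L → p ∈ S ∨ p ∈ pvNew S L := by
  intro L
  induction L with
  | nil => intro S p h; simp at h
  | cons t L ih =>
    intro S p h
    simp only [pvNew]
    by_cases hm : t ∈ S
    · rw [if_pos hm]
      rcases List.mem_cons.mp h with h | h
      · subst h; exact Or.inl hm
      · exact ih S p h
    · rw [if_neg hm]
      rcases List.mem_cons.mp h with h | h
      · subst h; exact Or.inr List.mem_cons_self
      · rcases ih (S ++ [t]) p h with hh | hh
        · rcases List.mem_append.mp hh with hh | hh
          · exact Or.inl hh
          · simp at hh; subst hh; exact Or.inr List.mem_cons_self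
        · exact Or.inr (List.mem_cons_of_mem t hh)

theorem nodup_append_pvNew : ∀ (L S : List (Int × Int)), S.Nodup →
    (S ++ pvNew S L).Nodup := by
  intro L
  induction L with
  | nil => intro S h; simpa [pvNew] using h
  | cons t L ih =>
    intro S h
    simp only [pvNew]
    by_cases hm : t ∈ S
    · rw [if_pos hm]; exact ih S h
    · rw [if_neg hm]
      have h2 : (S ++ [t]).Nodup := by
        rw [List.nodup_append]
        refine ⟨h, by simp, ?_⟩
        intro a ha b hb
        simp only [List.mem_singleton] at hb
        subst hb
        exact fun hab => hm (hab ▸ ha)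
      have := ih (S ++ [t]) h2
      simpa [List.append_assoc] using this

theorem pvStepS_eq (board : List String) (R C : Int) (fs : Nat)
    (S : PySem.Set (Int × Int)) (F : List (Int × Int)) :
    pvStepS board R C fs S F
      = (S ++ pvNew S (F.flatMap (pvNbrs board R C fs)),
         pvNew S (F.flatMap (pvNbrs board R C fs))) := by
  unfold pvStepS
  rw [← List.foldl_flatMap]
  simpa using pvGenFold (F.flatMap (pvNbrs board R C fs)) S []

-- the level sets: (visited set, frontier) after k whole levels
def pvVF (board : List String) (R C : Int) (fs : Nat) (src : Int × Int) :
    Nat → PySem.Set (Int × Int) × List (Int × Int)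
  | 0 => (PySem.Set.ofList [src], [src])
  | k + 1 =>
      pvStepS board R C fs (pvVF board R C fs src k).1 (pvVF board R C fs src k).2

theorem pvVF_succ (board : List String) (R C : Int) (fs : Nat) (src : Int × Int) (k : Nat) :
    pvVF board R C fs src (k + 1)
      = ((pvVF board R C fs src k).1
           ++ pvNew (pvVF board R C fs src k).1
                ((pvVF board R C fs src k).2.flatMap (pvNbrs board R C fs)),
         pvNew (pvVF board R C fs src k).1
           ((pvVF board R C fs src k).2.flatMap (pvNbrs board R C fs))) := by
  show pvStepS board R C fs (pvVF board R C fs src k).1 (pvVF board R C fs src k).2 = _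
  rw [pvStepS_eq]

theorem pvV_succ (board : List String) (R C : Int) (fs : Nat) (src : Int × Int) (k : Nat) :
    (pvVF board R C fs src (k + 1)).1
      = (pvVF board R C fs src k).1 ++ (pvVF board R C fs src (k + 1)).2 := by
  rw [pvVF_succ]

theorem pvV_nodup (board : List String) (R C : Int) (fs : Nat) (src : Int × Int) :
    ∀ k, (pvVF board R C fs src k).1.Nodup := by
  intro k
  induction k with
  | zero => simp [pvVF, PySem.Set.ofList]
  | succ k ih =>
    rw [pvVF_succ]
    exact nodup_append_pvNew _ _ ih

theorem pvF_sub_V (board : List String) (R C : Int) (fs : Nat) (src : Int × Int) :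
    ∀ k p, p ∈ (pvVF board R C fs src k).2 → p ∈ (pvVF board R C fs src k).1 := by
  intro k p h
  cases k with
  | zero => simpa [pvVF, PySem.Set.ofList] using h
  | succ k =>
    rw [pvV_succ]
    exact List.mem_append_right _ h

theorem pvF_not_V (board : List String) (R C : Int) (fs : Nat) (src : Int × Int) (k : Nat)
    (p : Int × Int) (h : p ∈ (pvVF board R C fs src (k + 1)).2) :
    p ∉ (pvVF board R C fs src k).1 := by
  rw [pvVF_succ] at h
  exact (mem_pvNew _ _ _ h).1

theorem pvV_mono (board : List String) (R C : Int) (fs : Nat) (src : Int × Int) :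
    ∀ j k, j ≤ k → ∀ p, p ∈ (pvVF board R C fs src j).1 → p ∈ (pvVF board R C fs src k).1 := by
  intro j k hjk
  induction k with
  | zero => intro p h; rwa [Nat.le_zero.mp hjk] at *
  | succ k ih =>
    intro p h
    rcases Nat.le_succ_iff_eq_or_le.mp hjk with heq | hle
    · rw [heq] at h; exact h
    · rw [pvV_succ]
      exact List.mem_append_left _ (ih hle p h)

theorem pvV_mem_iff (board : List String) (R C : Int) (fs : Nat) (src : Int × Int) :
    ∀ k p, p ∈ (pvVF board R C fs src k).1 ↔ ∃ j ≤ k, p ∈ (pvVF board R C fs src j).2 := by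
  intro k
  induction k with
  | zero =>
    intro p
    constructor
    · intro h; exact ⟨0, le_refl 0, by simpa [pvVF, PySem.Set.ofList] using h⟩
    · rintro ⟨j, hj, h⟩
      rw [Nat.le_zero.mp hj] at h
      exact pvF_sub_V board R C fs src 0 p h
  | succ k ih =>
    intro p
    rw [pvV_succ, List.mem_append]
    constructor
    · rintro (h | h)
      · obtain ⟨j, hj, hh⟩ := (ih p).mp h
        exact ⟨j, Nat.le_succ_of_le hj, hh⟩
      · exact ⟨k + 1, le_refl _, h⟩
    · rintro ⟨j, hj, hh⟩
      rcases Nat.le_succ_iff_eq_or_le.mp hj with heq | hle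
      · right; rw [heq] at hh; exact hh
      · left; exact (ih p).mpr ⟨j, hle, hh⟩

theorem pvF_uniq (board : List String) (R C : Int) (fs : Nat) (src : Int × Int)
    (j k : Nat) (p : Int × Int) (hj : p ∈ (pvVF board R C fs src j).2)
    (hk : p ∈ (pvVF board R C fs src k).2) : j = k := by
  by_contra hne
  rcases Nat.lt_or_ge j k with h | h
  · obtain ⟨k', rfl⟩ : ∃ k', k = k' + 1 := ⟨k - 1, by omega⟩
    exact pvF_not_V board R C fs src k' p hk
      (pvV_mono board R C fs src j k' (by omega) p (pvF_sub_V board R C fs src j p hj))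
  · have h2 : k < j := by omega
    obtain ⟨j', rfl⟩ : ∃ j', j = j' + 1 := ⟨j - 1, by omega⟩
    exact pvF_not_V board R C fs src j' p hj
      (pvV_mono board R C fs src k j' (by omega) p (pvF_sub_V board R C fs src k p hk))

theorem pvSuccMem (board : List String) (R C : Int) (fs : Nat) (src : Int × Int)
    (k : Nat) (p t : Int × Int) (hp : p ∈ (pvVF board R C fs src k).2)
    (ht : t ∈ pvNbrs board R C fs p) : t ∈ (pvVF board R C fs src (k + 1)).1 := by
  have hL : t ∈ (pvVF board R C fs src k).2.flatMap (pvNbrs board R C fs) :=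
    List.mem_flatMap.mpr ⟨p, hp, ht⟩
  rcases pvNew_cover _ _ t hL with h | h
  · rw [pvV_succ]; exact List.mem_append_left _ h
  · rw [pvV_succ, pvVF_succ]; exact List.mem_append_right _ h

theorem pvPredEx (board : List String) (R C : Int) (fs : Nat) (src : Int × Int)
    (k : Nat) (p : Int × Int) (hp : p ∈ (pvVF board R C fs src (k + 1)).2) :
    ∃ q ∈ (pvVF board R C fs src k).2, p ∈ pvNbrs board R C fs q := by
  rw [pvVF_succ] at hp
  have := (mem_pvNew _ _ _ hp).2
  exact List.mem_flatMap.mp this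

theorem pvV_inR (board : List String) (R C : Int) (fs : Nat) (src : Int × Int)
    (hsrc : pvInR R C src) :
    ∀ k p, p ∈ (pvVF board R C fs src k).1 → pvInR R C p := by
  intro k
  induction k with
  | zero => intro p h; simp [pvVF, PySem.Set.ofList] at h; rwa [h]
  | succ k ih =>
    intro p h
    rw [pvV_succ, List.mem_append] at h
    rcases h with h | h
    · exact ih p h
    · obtain ⟨q, hq, hnb⟩ := pvPredEx board R C fs src k p h
      unfold pvNbrs at hnb
      obtain ⟨d, _, hd⟩ := List.mem_map.mp hnb
      rw [← hd]
      have hqin : pvInR R C q := ih q (pvF_sub_V board R C fs src k q hq)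
      have : pvInR R C (q.1, q.2) := by simpa using hqin
      exact pvSlideA_inR board R C d.1 d.2 fs q.1 q.2 this

theorem pvF_empty_ge (board : List String) (R C : Int) (fs : Nat) (src : Int × Int)
    (j : Nat) (h : (pvVF board R C fs src j).2 = []) :
    ∀ k, j ≤ k → (pvVF board R C fs src k).2 = [] := by
  intro k hjk
  induction k with
  | zero => rwa [Nat.le_zero.mp hjk] at h
  | succ k ih =>
    rcases Nat.le_succ_iff_eq_or_le.mp hjk with heq | hle
    · rw [heq] at h; exact h
    · have hk := ih hle
      rw [pvVF_succ, hk]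
      simp [pvNew]

theorem pvV_len_ge (board : List String) (R C : Int) (fs : Nat) (src : Int × Int) :
    ∀ k, (pvVF board R C fs src k).2 ≠ [] → k + 1 ≤ (pvVF board R C fs src k).1.length := by
  intro k
  induction k with
  | zero => intro _; simp [pvVF, PySem.Set.ofList]
  | succ k ih =>
    intro hne
    have hk : (pvVF board R C fs src k).2 ≠ [] := by
      intro h
      exact hne (pvF_empty_ge board R C fs src k h (k + 1) (Nat.le_succ k))
    have h1 := ih hk
    rw [pvV_succ, List.length_append]
    have h2 : 1 ≤ (pvVF board R C fs src (k + 1)).2.length :=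
      Nat.one_le_iff_ne_zero.mpr (fun h => hne (List.length_eq_zero_iff.mp h))
    omega

theorem pvLev_none (board : List String) (R C : Int) (fs : Nat) (src : Int × Int)
    (destr destc : Int)
    (hnone : ∀ j, (destr, destc) ∉ (pvVF board R C fs src j).2) :
    ∀ (f k : Nat) (a : Int),
      pvLevLoop board R C fs destr destc f (pvVF board R C fs src k) a = -1 := by
  intro f
  induction f with
  | zero => intro k a; rfl
  | succ f ih =>
    intro k a
    cases hF : (pvVF board R C fs src k).2 with
    | nil => simp only [pvLevLoop, hF]
    | cons p rest =>
      simp only [pvLevLoop, hF]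
      rw [if_neg (by rw [← hF]; exact hnone k)]
      have hstep : pvStepS board R C fs (pvVF board R C fs src k).1 (p :: rest)
          = pvVF board R C fs src (k + 1) := by rw [← hF]; rfl
      rw [hstep]
      exact ih (k + 1) (a + 1)

theorem pvLev_found (board : List String) (R C : Int) (fs : Nat) (src : Int × Int)
    (destr destc : Int) (k0 : Nat)
    (hk0 : (destr, destc) ∈ (pvVF board R C fs src k0).2) :
    ∀ (f k : Nat) (a : Int), k ≤ k0 → k0 - k < f →
      pvLevLoop board R C fs destr destc f (pvVF board R C fs src k) a
        = a + ((k0 : Int) - (k : Int)) := by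
  intro f
  induction f with
  | zero => intro k a _ h; omega
  | succ f ih =>
    intro k a hk hf
    have hFne : (pvVF board R C fs src k).2 ≠ [] := by
      intro h
      rw [pvF_empty_ge board R C fs src k h k0 hk] at hk0
      simp at hk0
    cases hF : (pvVF board R C fs src k).2 with
    | nil => exact absurd hF hFne
    | cons p rest =>
      simp only [pvLevLoop, hF]
      by_cases hmem : (destr, destc) ∈ (pvVF board R C fs src k).2
      · have : k = k0 := pvF_uniq board R C fs src k k0 _ hmem hk0
        subst this
        rw [hF] at hmem
        rw [if_pos hmem]
        omega
      · have hklt : k < k0 := by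
          rcases Nat.lt_or_ge k k0 with h | h
          · exact h
          · have : k = k0 := by omega
            subst this
            exact absurd hk0 hmem
        rw [hF] at hmem
        rw [if_neg hmem]
        have hstep : pvStepS board R C fs (pvVF board R C fs src k).1 (p :: rest)
            = pvVF board R C fs src (k + 1) := by rw [← hF]; rfl
        rw [hstep, ih (k + 1) (a + 1) (by omega) (by omega)]
        push_cast
        ring

theorem pvCells_nodup (R C : Int) : (pvCellsB R C).Nodup :=
  List.Nodup.product (PySem.List.nodup_pyRange_one 0 R) (PySem.List.nodup_pyRange_one 0 C)

theorem pvCells_mem (R C : Int) (p : Int × Int) : p ∈ pvCellsB R C ↔ pvInR R C p := by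
  show p ∈ (PySem.List.pyRange 0 R 1) ×ˢ (PySem.List.pyRange 0 C 1) ↔ _
  rw [List.mem_product, PySem.List.mem_pyRange_one, PySem.List.mem_pyRange_one]
  unfold pvInR
  constructor
  · rintro ⟨⟨h1, h2⟩, h3, h4⟩; exact ⟨h1, h2, h3, h4⟩
  · rintro ⟨h1, h2, h3, h4⟩; exact ⟨⟨h1, h2⟩, h3, h4⟩

theorem pvCells_length (R C : Int) : (pvCellsB R C).length = R.toNat * C.toNat := by
  show ((PySem.List.pyRange 0 R 1) ×ˢ (PySem.List.pyRange 0 C 1)).length = _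
  rw [List.length_product, PySem.List.length_pyRange_one, PySem.List.length_pyRange_one]
  have h1 : R - 0 = R := by ring
  have h2 : C - 0 = C := by ring
  rw [h1, h2]

-- the frontier levels stay strictly below R*C in length terms
theorem pvFk_lt (board : List String) (R C : Int) (fs : Nat) (src : Int × Int)
    (hsrc : pvInR R C src) :
    ∀ (k : Nat) (p : Int × Int), p ∈ (pvVF board R C fs src k).2 →
      k < R.toNat * C.toNat := by
  intro k p hp
  have hne : (pvVF board R C fs src k).2 ≠ [] := by
    intro h; rw [h] at hp; simp at hp
  have h1 := pvV_len_ge board R C fs src k hne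
  have hsub : (pvVF board R C fs src k).1 ⊆ pvCellsB R C := by
    intro q hq
    exact (pvCells_mem R C q).mpr (pvV_inR board R C fs src hsrc k q hq)
  have h2 : (pvVF board R C fs src k).1.length ≤ (pvCellsB R C).length :=
    ((pvV_nodup board R C fs src k).subperm hsub).length_le
  rw [pvCells_length] at h2
  omega

theorem pvGetD_preds0 (c : Int × Int) :
    ∀ (cells : List (Int × Int)) (d : PySem.Dict (Int × Int) (List (Int × Int))),
      d.getD c [] = [] →
      (cells.foldl (fun d p => d.insert p []) d).getD c [] = [] := by
  intro cells
  induction cells with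
  | nil => intro d h; exact h
  | cons p cells ih =>
    intro d h
    simp only [List.foldl_cons]
    apply ih
    rw [PySem.Dict.getD_insert]
    split <;> [rfl; exact h]

-- the preds dict characterised by membership
theorem pvMem_preds (board : List String) (R C : Int) (fs : Nat)
    (cells : List (Int × Int)) (p q : Int × Int) :
    q ∈ (pvPreds board R C fs cells).getD p [] ↔
      q ∈ cells ∧ ∃ dd ∈ pvDmA, pvSlideA board R C dd.1 dd.2 fs q.1 q.2 = p := by
  have hx : pvPreds board R C fs cells
      = (cells.flatMap (fun q => pvDirsB.map
          (fun dd => (pvSlideB board R C dd.1 dd.2 fs q.1 q.2, q)))).foldl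
          (fun d pr => d.modify pr.1 [] (· ++ [pr.2])) (pvPreds0 cells) := by
    unfold pvPreds
    rw [List.foldl_flatMap]
    apply PySem.List.foldl_congr_mem
    intro d qq _
    rw [List.foldl_map]
  rw [hx, PySem.Dict.getD_foldl_modify_append]
  have h0 : (pvPreds0 cells).getD p [] = [] := by
    unfold pvPreds0
    exact pvGetD_preds0 p cells PySem.Dict.empty (by rw [PySem.Dict.getD_empty])
  rw [h0]
  simp only [List.nil_append, List.mem_map, List.mem_filter, List.mem_flatMap]
  constructor
  · rintro ⟨pr, ⟨⟨q', hq', dd, hdd, hpr⟩, hfst⟩, hsnd⟩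
    rw [← hpr] at hfst hsnd
    simp only [beq_iff_eq] at hfst
    simp only at hsnd
    subst hsnd
    refine ⟨hq', dd, hdd, ?_⟩
    rw [← pvSlideB_eq_A]
    exact hfst
  · rintro ⟨hq, dd, hdd, hslide⟩
    refine ⟨(pvSlideB board R C dd.1 dd.2 fs q.1 q.2, q), ⟨⟨q, hq, dd, hdd, rfl⟩, ?_⟩, rfl⟩
    simp only [beq_iff_eq]
    rw [pvSlideB_eq_A]
    exact hslide

theorem pvFoldl_ignore_iterate {α : Type} (g : α → α) :
    ∀ (l : List Int) (x : α), l.foldl (fun a _ => g a) x = g^[l.length] x := by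
  intro l
  induction l with
  | nil => intro x; rfl
  | cons h t ih =>
    intro x
    simp only [List.foldl_cons, List.length_cons]
    rw [ih (g x), ← Function.iterate_succ_apply]

-- the Bellman-Ford value table as a plain function of the round index
def pvD (predsL : Int × Int → List (Int × Int)) (src : Int × Int) (INF : Int) :
    Nat → Int × Int → Int
  | 0 => fun p => if p = src then 0 else INF
  | i + 1 => fun p =>
      ((predsL p).map (fun q => pvD predsL src INF i q + 1)).foldl min
        (pvD predsL src INF i p)

theorem pvItems_getD (cells : List (Int × Int)) (g : Int × Int → Int)
    (d : PySem.Dict (Int × Int) Int) (hnd : cells.Nodup)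
    (hit : d.items = cells.map (fun p => (p, g p))) :
    ∀ q ∈ cells, d.getD q 0 = g q := by
  intro q hq
  have hkeys : d.keys = cells := by
    show d.items.map (·.1) = cells
    rw [hit, List.map_map]
    simp [Function.comp_def]
  apply PySem.Dict.getD_of_mem_items
  · rw [hit]
    exact List.mem_map.mpr ⟨q, hq, rfl⟩
  · rw [hkeys]; exact hnd

-- the rounds of B's relaxation loop compute exactly the table pvD
theorem pvDist_items (cells : List (Int × Int)) (src : Int × Int) (INF : Int)
    (preds : PySem.Dict (Int × Int) (List (Int × Int)))
    (hnd : cells.Nodup) (hsrc : src ∈ cells)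
    (hpc : ∀ p q : Int × Int, q ∈ preds.getD p [] → q ∈ cells) :
    ∀ i : Nat,
      ((fun d => pvRelax preds d)^[i]
          ((cells.foldl (fun d p => d.insert p INF) PySem.Dict.empty).insert src 0)).items
        = cells.map (fun p => (p, pvD (fun p => preds.getD p []) src INF i p)) := by
  intro i
  induction i with
  | zero =>
    simp only [Function.iterate_zero, id_eq]
    have h1 : (cells.foldl (fun d p => d.insert p INF) PySem.Dict.empty).items
        = cells.map (fun p => (p, INF)) := by
      have := PySem.Dict.items_foldl_insert_fresh (l := cells) (k := fun a => a)
        (v := fun _ => INF) (d := PySem.Dict.empty)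
        (by intro a _; rw [PySem.Dict.contains_empty]) (by simpa using hnd)
      simpa using this
    have hcont : (cells.foldl (fun d p => d.insert p INF) PySem.Dict.empty).contains src
        = true := by
      rw [PySem.Dict.contains_iff_mem_keys]
      show src ∈ (cells.foldl (fun d p => d.insert p INF) PySem.Dict.empty).items.map (·.1)
      rw [h1, List.map_map]
      simpa using hsrc
    rw [PySem.Dict.items_insert_of_contains _ 0 hcont, h1, List.map_map]
    apply List.map_congr_left
    intro p hp
    by_cases hps : p = src
    · subst hps; simp [pvD]
    · simp only [Function.comp_apply, pvD]
      rw [if_neg (by simpa using hps), if_neg hps]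
  | succ i ih =>
    rw [Function.iterate_succ_apply']
    set d := (fun d => pvRelax preds d)^[i]
        ((cells.foldl (fun d p => d.insert p INF) PySem.Dict.empty).insert src 0) with hd
    set g := pvD (fun p => preds.getD p []) src INF i with hg
    have hgetD : ∀ q ∈ cells, d.getD q 0 = g q := pvItems_getD cells g d hnd ih
    show (pvRelax preds d).items = _
    unfold pvRelax
    have hfresh := PySem.Dict.items_foldl_insert_fresh (l := d.items) (k := fun pv => pv.1)
      (v := fun pv => (PySem.List.min?
          (pv.2 :: (preds.getD pv.1 []).map (fun q => d.getD q 0 + 1)) (fun x => x)).getD 0)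
      (d := PySem.Dict.empty)
      (by intro a _; rw [PySem.Dict.contains_empty])
      (by rw [ih, List.map_map]; simpa [Function.comp_def] using hnd)
    rw [hfresh, ih, List.map_map]
    have hie : (PySem.Dict.empty : PySem.Dict (Int × Int) Int).items = [] := rfl
    rw [hie, List.nil_append]
    apply List.map_congr_left
    intro p hp
    simp only [Function.comp_apply]
    rw [PySem.List.min?_id_cons, Option.getD_some]
    have hmapeq : (preds.getD p []).map (fun q => d.getD q 0 + 1)
        = (preds.getD p []).map (fun q => g q + 1) := by
      apply List.map_congr_left
      intro q hq
      rw [hgetD q (hpc p q hq)]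
    rw [hmapeq]
    rfl

-- the Bellman-Ford table pvD against the BFS levels: after i rounds, a cell of frontier
-- level k ≤ i holds exactly k, and every cell not yet discovered holds INF
theorem pvD_char (board : List String) (R C : Int) (fs : Nat) (src : Int × Int)
    (cells : List (Int × Int)) (predsL : Int × Int → List (Int × Int)) (INF : Int)
    (hINF : INF = R * C + 1)
    (hcellsmem : ∀ p, p ∈ cells ↔ pvInR R C p)
    (hsrc : pvInR R C src)
    (hpred : ∀ p q, q ∈ predsL p ↔ q ∈ cells ∧ ∃ dd ∈ pvDmA,
        pvSlideA board R C dd.1 dd.2 fs q.1 q.2 = p) :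
    ∀ i : Nat,
      (∀ k : Nat, k ≤ i → ∀ p ∈ (pvVF board R C fs src k).2,
          pvD predsL src INF i p = (k : Int)) ∧
      (∀ p ∈ cells, (∀ k : Nat, k ≤ i → p ∉ (pvVF board R C fs src k).2) →
          pvD predsL src INF i p = INF) := by
  have hRpos : 0 < R := by obtain ⟨h1, h2, _, _⟩ := hsrc; omega
  have hCpos : 0 < C := by obtain ⟨_, _, h3, h4⟩ := hsrc; omega
  have hkINF : ∀ (k : Nat) (p : Int × Int), p ∈ (pvVF board R C fs src k).2 →
      (k : Int) < INF := by
    intro k p hp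
    have h1 := pvFk_lt board R C fs src hsrc k p hp
    have h2 : ((R.toNat * C.toNat : Nat) : Int) = R * C := by
      push_cast
      rw [Int.toNat_of_nonneg (by omega), Int.toNat_of_nonneg (by omega)]
    omega
  have hF0 : (pvVF board R C fs src 0).2 = [src] := rfl
  have hFcell : ∀ (k : Nat) (p : Int × Int), p ∈ (pvVF board R C fs src k).2 → p ∈ cells := by
    intro k p hp
    exact (hcellsmem p).mpr
      (pvV_inR board R C fs src hsrc k p (pvF_sub_V board R C fs src k p hp))
  have hnbr : ∀ p q : Int × Int,
      (∃ dd ∈ pvDmA, pvSlideA board R C dd.1 dd.2 fs q.1 q.2 = p) ↔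
        p ∈ pvNbrs board R C fs q := by
    intro p q
    unfold pvNbrs
    rw [List.mem_map]
  intro i
  induction i with
  | zero =>
    constructor
    · intro k hk p hp
      interval_cases k
      rw [hF0] at hp
      rw [List.mem_singleton] at hp
      subst hp
      simp [pvD]
    · intro p _ hnone
      have := hnone 0 (le_refl 0)
      rw [hF0] at this
      simp only [List.mem_singleton] at this
      simp [pvD, this]
  | succ i ih =>
    obtain ⟨iha, ihb⟩ := ih
    have hq_char : ∀ q ∈ cells,
        (∃ m : Nat, m ≤ i ∧ q ∈ (pvVF board R C fs src m).2 ∧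
          pvD predsL src INF i q = (m : Int)) ∨
        (pvD predsL src INF i q = INF ∧
          ∀ m : Nat, m ≤ i → q ∉ (pvVF board R C fs src m).2) := by
      intro q hq
      by_cases h : ∃ m : Nat, m ≤ i ∧ q ∈ (pvVF board R C fs src m).2
      · obtain ⟨m, hm, hmem⟩ := h
        exact Or.inl ⟨m, hm, hmem, iha m hm q hmem⟩
      · exact Or.inr ⟨ihb q hq (fun m hm hmem => h ⟨m, hm, hmem⟩),
          fun m hm hmem => h ⟨m, hm, hmem⟩⟩
    constructor
    · intro k hk p hp
      have hpc : p ∈ cells := hFcell k p hp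
      show ((predsL p).map (fun q => pvD predsL src INF i q + 1)).foldl min
        (pvD predsL src INF i p) = (k : Int)
      have hub : ∀ y ∈ (predsL p).map (fun q => pvD predsL src INF i q + 1),
          (k : Int) ≤ y := by
        intro y hy
        obtain ⟨q, hqmem, rfl⟩ := List.mem_map.mp hy
        obtain ⟨hqc, hdd⟩ := (hpred p q).mp hqmem
        have hpn : p ∈ pvNbrs board R C fs q := (hnbr p q).mp hdd
        rcases hq_char q hqc with ⟨m, hm, hqF, hval⟩ | ⟨hval, _⟩
        · rw [hval]
          have hpV : p ∈ (pvVF board R C fs src (m + 1)).1 :=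
            pvSuccMem board R C fs src m q p hqF hpn
          obtain ⟨j, hj, hpFj⟩ := (pvV_mem_iff board R C fs src (m + 1) p).mp hpV
          have : j = k := pvF_uniq board R C fs src j k p hpFj hp
          omega
        · rw [hval]
          have := hkINF k p hp
          omega
      have hbase_ge : (k : Int) ≤ pvD predsL src INF i p := by
        by_cases hki : k ≤ i
        · rw [iha k hki p hp]
        · have hkeq : k = i + 1 := by omega
          subst hkeq
          have hnV : p ∉ (pvVF board R C fs src i).1 := pvF_not_V board R C fs src i p hp
          have hnone : ∀ m : Nat, m ≤ i → p ∉ (pvVF board R C fs src m).2 := by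
            intro m hm hmem
            exact hnV ((pvV_mem_iff board R C fs src i p).mpr ⟨m, hm, hmem⟩)
          rw [ihb p hpc hnone]
          have := hkINF (i + 1) p hp
          omega
      have hge : (k : Int) ≤ ((predsL p).map (fun q => pvD predsL src INF i q + 1)).foldl min
          (pvD predsL src INF i p) := by
        rcases PySem.List.foldl_min_mem
            ((predsL p).map (fun q => pvD predsL src INF i q + 1))
            (pvD predsL src INF i p) with h | h
        · rw [h]; exact hbase_ge
        · exact hub _ h
      have hle : ((predsL p).map (fun q => pvD predsL src INF i q + 1)).foldl min
          (pvD predsL src INF i p) ≤ (k : Int) := by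
        by_cases hki : k ≤ i
        · rw [iha k hki p hp]
          exact (PySem.List.foldl_min_le
            ((predsL p).map (fun q => pvD predsL src INF i q + 1)) (k : Int)).1
        · have hkeq : k = i + 1 := by omega
          subst hkeq
          obtain ⟨q, hqF, hpn⟩ := pvPredEx board R C fs src i p hp
          have hqc : q ∈ cells := hFcell i q hqF
          have hqmem : q ∈ predsL p := (hpred p q).mpr ⟨hqc, (hnbr p q).mpr hpn⟩
          have hval : pvD predsL src INF i q = (i : Int) := iha i (le_refl i) q hqF
          have hel : ((i : Int) + 1) ∈ (predsL p).map (fun q => pvD predsL src INF i q + 1) :=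
            List.mem_map.mpr ⟨q, hqmem, by rw [hval]⟩
          have := (PySem.List.foldl_min_le
            ((predsL p).map (fun q => pvD predsL src INF i q + 1))
            (pvD predsL src INF i p)).2 _ hel
          push_cast
          exact this
      omega
    · intro p hp hnone
      show ((predsL p).map (fun q => pvD predsL src INF i q + 1)).foldl min
        (pvD predsL src INF i p) = INF
      have hbase : pvD predsL src INF i p = INF :=
        ihb p hp (fun m hm => hnone m (by omega))
      have hels : ∀ y ∈ (predsL p).map (fun q => pvD predsL src INF i q + 1),
          y = INF + 1 := by
        intro y hy
        obtain ⟨q, hqmem, rfl⟩ := List.mem_map.mp hy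
        obtain ⟨hqc, hdd⟩ := (hpred p q).mp hqmem
        have hpn : p ∈ pvNbrs board R C fs q := (hnbr p q).mp hdd
        rcases hq_char q hqc with ⟨m, hm, hqF, hval⟩ | ⟨hval, _⟩
        · exfalso
          have hpV : p ∈ (pvVF board R C fs src (m + 1)).1 :=
            pvSuccMem board R C fs src m q p hqF hpn
          obtain ⟨j, hj, hpFj⟩ := (pvV_mem_iff board R C fs src (m + 1) p).mp hpV
          exact hnone j (by omega) hpFj
        · rw [hval]
      rcases PySem.List.foldl_min_mem
          ((predsL p).map (fun q => pvD predsL src INF i q + 1))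
          (pvD predsL src INF i p) with h | h
      · rw [h]; exact hbase
      · exfalso
        have h1 := hels _ h
        have h2 := (PySem.List.foldl_min_le
          ((predsL p).map (fun q => pvD predsL src INF i q + 1))
          (pvD predsL src INF i p)).1
        rw [hbase] at h1 h2
        omega

theorem solution_spec : Claim_equal_solution := by
  unfold Claim_equal_solution
  intro board _ hpre
  obtain ⟨hne, hC0, hrows⟩ := hpre
  unfold Spec_solution
  set R : Int := (board.length : Int) with hRdef
  set C : Int := PySem.Str.len (board.headD "") with hCdef
  have hClen : C = ((board.headD "").toList.length : Int) := by rw [hCdef, PySem.Str.len_eq]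
  have hCpos : 0 < C := by omega
  have hRpos : 0 < R := by
    rw [hRdef]
    cases board with
    | nil => exact absurd rfl hne
    | cons h t => simp
  set fs : Nat := R.toNat + C.toNat with hfs
  set sd := pvScanA board R C with hsd
  have hsrcin : pvInR R C sd.1 := (pvScanA_inR board R C hRpos hCpos).1
  have hdestin : pvInR R C sd.2 := (pvScanA_inR board R C hRpos hCpos).2
  set cells := pvCellsB R C with hcells
  set preds := pvPreds board R C fs cells with hpreds
  set INF : Int := R * C + 1 with hINFdef
  set N : Nat := (R * C).toNat with hNdef
  have hRCcast : R * C = ((R.toNat * C.toNat : Nat) : Int) := by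
    rw [Nat.cast_mul, Int.toNat_of_nonneg (le_of_lt hRpos),
      Int.toNat_of_nonneg (le_of_lt hCpos)]
  have hNRC : R.toNat * C.toNat = N := by
    have h1 : ((N : Nat) : Int) = R * C := by
      rw [hNdef]
      exact Int.toNat_of_nonneg (mul_nonneg (le_of_lt hRpos) (le_of_lt hCpos))
    have h2 : ((R.toNat * C.toNat : Nat) : Int) = R * C := hRCcast.symm
    exact_mod_cast h2.trans h1.symm
  have hNpos : (N : Int) = R * C := by rw [hRCcast, ← hNRC]
  -- A's run as the level loop
  rw [pvA_to_lev board ⟨hne, hC0, hrows⟩]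
  have hVF0 : (PySem.Set.ofList [sd.1], [sd.1]) = pvVF board R C fs sd.1 0 := rfl
  rw [hVF0, hNRC]
  -- B's run as the table pvD
  set dist0 := (cells.foldl (fun d p => d.insert p INF) PySem.Dict.empty).insert sd.1 0
    with hdist0
  have hBeq : solution_alt board =
      (if ((PySem.List.pyRange 0 (R * C) 1).foldl (fun d _ => pvRelax preds d) dist0).getD
            sd.2 0 < INF
       then ((PySem.List.pyRange 0 (R * C) 1).foldl (fun d _ => pvRelax preds d) dist0).getD
            sd.2 0
       else -1) := rfl
  have hiter : (PySem.List.pyRange 0 (R * C) 1).foldl (fun d _ => pvRelax preds d) dist0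
      = (fun d => pvRelax preds d)^[N] dist0 := by
    rw [pvFoldl_ignore_iterate (fun d => pvRelax preds d),
      PySem.List.length_pyRange_one, show R * C - 0 = R * C from by ring]
  have hsrcmem : sd.1 ∈ cells := (pvCells_mem R C sd.1).mpr hsrcin
  have hdestmem : sd.2 ∈ cells := (pvCells_mem R C sd.2).mpr hdestin
  have hpc : ∀ p q : Int × Int, q ∈ preds.getD p [] → q ∈ cells := by
    intro p q hq
    exact ((pvMem_preds board R C fs cells p q).mp hq).1
  have hitems := pvDist_items cells sd.1 INF preds (pvCells_nodup R C) hsrcmem hpc N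
  have hdd : ((fun d => pvRelax preds d)^[N] dist0).getD sd.2 0
      = pvD (fun p => preds.getD p []) sd.1 INF N sd.2 :=
    pvItems_getD cells _ _ (pvCells_nodup R C) hitems sd.2 hdestmem
  rw [hBeq, hiter, hdd]
  obtain ⟨ha, hb⟩ := pvD_char board R C fs sd.1 cells (fun p => preds.getD p []) INF
    hINFdef (fun p => pvCells_mem R C p) hsrcin
    (fun p q => pvMem_preds board R C fs cells p q) N
  by_cases hreach : ∃ k : Nat, sd.2 ∈ (pvVF board R C fs sd.1 k).2
  · obtain ⟨k0, hk0⟩ := hreach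
    have hk0lt : k0 < N := by
      rw [← hNRC]
      exact pvFk_lt board R C fs sd.1 hsrcin k0 sd.2 hk0
    have hA := pvLev_found board R C fs sd.1 sd.2.1 sd.2.2 k0 hk0 (N + 2) 0 0
      (Nat.zero_le k0) (by omega)
    rw [hA]
    have hBval : pvD (fun p => preds.getD p []) sd.1 INF N sd.2 = (k0 : Int) :=
      ha k0 (by omega) sd.2 hk0
    have hklt : (k0 : Int) < (N : Int) := by exact_mod_cast hk0lt
    rw [hBval, if_pos (by omega)]
    push_cast
    ring
  · have hnone : ∀ j : Nat, sd.2 ∉ (pvVF board R C fs sd.1 j).2 := by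
      intro j hj
      exact hreach ⟨j, hj⟩
    rw [pvLev_none board R C fs sd.1 sd.2.1 sd.2.2 hnone (N + 2) 0 0]
    have hBval : pvD (fun p => preds.getD p []) sd.1 INF N sd.2 = INF :=
      hb sd.2 hdestmem (fun k _ => hnone k)
    rw [hBval, if_neg (by omega)]
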